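-- pv_equiv track=rewrite | github.com/TextCorpusLabs/VLNGramCounter | src/VLNGramCounter/utils/pipeline_helper.py | aggregate_ngrams
-- ===== SOURCE A (Python) =====
-- import typing as t
--
-- def aggregate_ngrams(ngrams: t.Iterator[t.List[str]]) -> t.Iterator[t.Tuple[str, int]]:
--     prev_gram: str | None = None
--     prev_cnt: int = 0
--     for ngram in ngrams:
--         if prev_gram is None:
--             prev_gram = ngram[0]
--             prev_cnt = int(ngram[1])
--         elif prev_gram == ngram[0]:
--             prev_cnt += int(ngram[1])
--         else:
--             yield (prev_gram, prev_cnt)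
--             prev_gram = ngram[0]
--             prev_cnt = int(ngram[1])
--     if prev_gram is not None:
--         yield (prev_gram, prev_cnt)
-- ===== SOURCE B (Python) =====
-- import typing as t
--
-- def aggregate_ngrams(ngrams: t.Iterator[t.List[str]]) -> t.Iterator[t.Tuple[str, int]]:
--     grams = list(ngrams)
--     n = len(grams)
--     i = 0
--     while i < n:
--         key = grams[i][0]
--         total = 0
--         j = i
--         while j < n and grams[j][0] == key:
--             total += int(grams[j][1])
--             j += 1
--         yield (key, total)
--         i = j
-- ===== Notes on version B (the rewrite author's own statement) =====
-- stated objective: alternative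
-- what changed: Replaces the prev_gram/prev_cnt None-sentinel accumulator loop by groupby-style span grouping: an outer loop that takes each run of consecutive equal keys with an inner scan and sums it directly.
import Mathlib
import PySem

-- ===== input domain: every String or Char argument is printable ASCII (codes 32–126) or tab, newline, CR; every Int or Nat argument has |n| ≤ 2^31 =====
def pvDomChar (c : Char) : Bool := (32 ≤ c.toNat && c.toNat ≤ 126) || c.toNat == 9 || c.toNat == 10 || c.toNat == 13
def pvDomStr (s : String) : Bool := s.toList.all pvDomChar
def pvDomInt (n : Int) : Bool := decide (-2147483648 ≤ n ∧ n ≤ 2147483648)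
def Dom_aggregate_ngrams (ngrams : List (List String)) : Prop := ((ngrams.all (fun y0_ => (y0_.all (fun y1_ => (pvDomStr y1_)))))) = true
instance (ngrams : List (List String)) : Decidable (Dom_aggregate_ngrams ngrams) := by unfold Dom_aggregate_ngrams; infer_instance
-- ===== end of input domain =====

-- B replaces A's prev_gram/prev_cnt sentinel accumulator by groupby-style span grouping (alternative, same cost).

-- ===== PORT A =====
-- the generator loop of A: state = (prev_gram, prev_cnt); final yield after the loop
def aggregate_ngrams_loopA (prev_gram : Option String) (prev_cnt : Int) : List (List String) → List (String × Int)
  | [] => match prev_gram with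
          | none => []
          | some pg => [(pg, prev_cnt)]
  | g :: rest =>
    let k := (PySem.List.pyGet? g 0).getD ""          -- ngram[0] (Pre_ guarantees in range)
    let c := (PySem.Int.ofStr? ((PySem.List.pyGet? g 1).getD "")).getD 0   -- int(ngram[1])
    match prev_gram with
    | none => aggregate_ngrams_loopA (some k) c rest
    | some pg =>
      if pg == k then aggregate_ngrams_loopA (some pg) (prev_cnt + c) rest
      else (pg, prev_cnt) :: aggregate_ngrams_loopA (some k) c rest

def aggregate_ngrams (ngrams : List (List String)) : List (String × Int) :=
  aggregate_ngrams_loopA none 0 ngrams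

-- ===== PORT B =====
def altKey (g : List String) : String := (PySem.List.pyGet? g 0).getD ""
def altCnt (g : List String) : Int := (PySem.Int.ofStr? ((PySem.List.pyGet? g 1).getD "")).getD 0

-- the inner while loop of B: sum the run of entries whose key equals `key`, return (total, remainder)
def altSpan (key : String) : List (List String) → Int × List (List String)
  | [] => (0, [])
  | h :: t =>
    if altKey h == key then
      (altCnt h + (altSpan key t).1, (altSpan key t).2)
    else (0, h :: t)

theorem altSpan_length_le (key : String) (l : List (List String)) : (altSpan key l).2.length ≤ l.length := by
  induction l with
  | nil => simp [altSpan]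
  | cons h t ih =>
    simp only [altSpan]
    split
    · exact Nat.le_succ_of_le ih
    · simp

def aggregate_ngrams_alt : List (List String) → List (String × Int)
  | [] => []
  | g :: rest =>
    (altKey g, altCnt g + (altSpan (altKey g) rest).1) :: aggregate_ngrams_alt (altSpan (altKey g) rest).2
  termination_by l => l.length
  decreasing_by
    simpa using Nat.lt_succ_of_le (altSpan_length_le (altKey g) rest)

-- ===== PRECONDITION & SPEC =====
-- Pre_ excludes exactly the inputs where Python A raises: an ngram shorter than 2 (IndexError on
-- ngram[0]/ngram[1]) or an ngram[1] that int() rejects (ValueError).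
def Pre_aggregate_ngrams (ngrams : List (List String)) : Prop :=
  (ngrams.all (fun g => 2 ≤ g.length && ((PySem.Int.ofStr? (g.getD 1 "")).isSome))) = true
instance (ngrams : List (List String)) : Decidable (Pre_aggregate_ngrams ngrams) := by
  unfold Pre_aggregate_ngrams; infer_instance
def pvWitness_aggregate_ngrams : List (List String) := [["a", "1"], ["a", "2"], ["b", " 3 "]]
def Spec_aggregate_ngrams (ngrams : List (List String)) (out : List (String × Int)) : Prop := out = aggregate_ngrams_alt ngrams
instance (ngrams : List (List String)) (out : List (String × Int)) : Decidable (Spec_aggregate_ngrams ngrams out) := by unfold Spec_aggregate_ngrams; infer_instance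

-- ===== CLAIM (what is proved, stated in full; the proofs are below) =====
def Claim_equal_aggregate_ngrams : Prop := ∀ (ngrams : List (List String)), Dom_aggregate_ngrams ngrams → Pre_aggregate_ngrams ngrams → Spec_aggregate_ngrams ngrams (aggregate_ngrams ngrams)

-- ===== LEMMAS AND PROOFS =====

-- A's loop with a live sentinel = one B group prepended to B on the remainder
theorem loopA_some (l : List (List String)) : ∀ (pg : String) (pc : Int),
    aggregate_ngrams_loopA (some pg) pc l = (pg, pc + (altSpan pg l).1) :: aggregate_ngrams_alt (altSpan pg l).2 := by
  induction l with
  | nil => intro pg pc; simp [aggregate_ngrams_loopA, altSpan, aggregate_ngrams_alt]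
  | cons h t ih =>
    intro pg pc
    by_cases hk : pg = altKey h
    · have hb : (pg == altKey h) = true := by simp [hk]
      have hb' : (altKey h == pg) = true := by simp [hk]
      simp only [aggregate_ngrams_loopA, altSpan, altKey, altCnt] at *
      rw [if_pos hb, if_pos hb', ih]
      simp [add_assoc]
    · have hb : (pg == altKey h) = false := by simp [hk]
      have hb' : (altKey h == pg) = false := by simp only [beq_eq_false_iff_ne]; exact fun h' => hk h'.symm
      simp only [aggregate_ngrams_loopA, altSpan, altKey, altCnt] at *
      rw [if_neg (by simp [hb]), if_neg (by simp [hb']), ih]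
      simp [aggregate_ngrams_alt, altKey, altCnt]

-- ===== VERDICT (by name: the statement is the Claim_ definition above) =====
theorem aggregate_ngrams_spec : Claim_equal_aggregate_ngrams := by
  intro ngrams _ _
  unfold Spec_aggregate_ngrams aggregate_ngrams
  cases ngrams with
  | nil => simp [aggregate_ngrams_loopA, aggregate_ngrams_alt]
  | cons g rest =>
    simp only [aggregate_ngrams_loopA]
    rw [loopA_some]
    simp [aggregate_ngrams_alt, altKey, altCnt]
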